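-- pv_equiv track=rewrite | github.com/ang-cai/conform | conform.py | please_flip_bare
-- ===== SOURCE A (Python) =====
-- def please_flip_bare(caps: list[str])-> list[str]:
--   """
--     Generates a minimal list of shouts needed to have all fan caps face the same direction, skipping
--     fans with no cap.
--
--       Args:
--       caps: list of strings which are either 'F' (Forward) or 'B' (Backward) or 'H' (Bareheaded)
--
--       Return:
--       a list of shouts, which could be empty if the list of caps is either empty or all the same direction
--   """
--   intervals = []
--   interval_start = 0
--   forward_count = backward_count = 0
--   shouts = []
--   new_caps = caps.copy()
--   new_caps.append("end")
--   #Step 1: Determine intervals where hats face the same direction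
--   for i in range(1, len(new_caps)):
--     if new_caps[interval_start] != new_caps[i]:
--       intervals.append((interval_start, i - 1, new_caps[interval_start])) #(start, end, direction)
--
--       if new_caps[interval_start] == 'F':
--         forward_count += 1
--       elif new_caps[interval_start] == 'B':
--         backward_count += 1
--       interval_start = i   #new hat direction->new interval start
--
--   #Step 2: Decide which way to flip based on hat direction with least number of intervals
--   if forward_count < backward_count:
--     flip_direction = 'F'
--   else:
--     flip_direction = 'B'
--
--   #Step 3: Flip all of the intervals that match with the flip direction
--   for t in intervals:
--     if t[2] == flip_direction and str(t[0]) != str(t[1]):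
--         shouts.append(f"People in positions {str(t[0])} through {str(t[1])} flip your caps!")
--     elif t[2] == flip_direction:
--         shouts.append(f"Person in position {str(t[0])} flip your cap!")
--
--   return shouts
-- ===== SOURCE B (Python) =====
-- def _shout(s: int, e: int) -> str:
--     if s != e:
--         return f"People in positions {s} through {e} flip your caps!"
--     return f"Person in position {s} flip your cap!"
--
--
-- def _shouts_for(caps: list[str], d: str) -> list[str]:
--     n = len(caps)
--     starts = [i for i in range(n) if caps[i] == d and (i == 0 or caps[i - 1] != d)]
--     ends = [i for i in range(n) if caps[i] == d and (i == n - 1 or caps[i + 1] != d)]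
--     return [_shout(s, e) for s, e in zip(starts, ends)]
--
--
-- def please_flip_bare(caps: list[str]) -> list[str]:
--     forward = _shouts_for(caps, 'F')
--     backward = _shouts_for(caps, 'B')
--     return forward if len(forward) < len(backward) else backward
-- ===== Notes on version B (the rewrite author's own statement) =====
-- stated objective: alternative
-- what changed: B drops A's sequential run-scan with interval list, start-index state and counters entirely: for each direction it detects run starts and run ends independently by boundary comprehensions over indices (caps[i]==d and neighbour differs), zips them into shouts, and returns the shorter of the two shout lists (backward on ties).
import Mathlib
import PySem

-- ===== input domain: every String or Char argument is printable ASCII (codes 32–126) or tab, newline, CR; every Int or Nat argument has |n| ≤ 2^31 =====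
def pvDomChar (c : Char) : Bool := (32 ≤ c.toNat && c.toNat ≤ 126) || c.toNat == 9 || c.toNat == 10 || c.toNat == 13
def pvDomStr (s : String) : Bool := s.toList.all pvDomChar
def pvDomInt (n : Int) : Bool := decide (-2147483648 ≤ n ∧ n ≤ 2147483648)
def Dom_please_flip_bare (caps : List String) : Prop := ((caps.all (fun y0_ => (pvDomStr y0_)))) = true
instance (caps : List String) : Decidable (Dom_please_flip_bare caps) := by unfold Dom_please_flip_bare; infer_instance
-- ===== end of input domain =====

-- B replaces A's sequential run-scan (intervals list, start-index state, counters, second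
-- emission pass) by stateless per-direction boundary comprehensions: run starts and run ends
-- of each direction are collected independently and zipped into shouts; the shorter shout
-- list is returned (backward on ties). Same return value; neither version mutates caps.

-- ===== PORT A =====
-- the loop body of A's step-1 'for i in range(1, len(new_caps))' loop
def pvStepA (nc : List String) (st : List (Int × Int × String) × Int × Int × Int) (i : Int) :
    List (Int × Int × String) × Int × Int × Int :=
  let (intervals, interval_start, fc, bc) := st
  if PySem.List.pyGet? nc interval_start ≠ PySem.List.pyGet? nc i then
    -- interval_start is always a valid index, so the .getD "" default is never used
    let dir := (PySem.List.pyGet? nc interval_start).getD ""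
    let intervals := intervals ++ [(interval_start, i - 1, dir)]
    let fcbc := if dir = "F" then (fc + 1, bc) else if dir = "B" then (fc, bc + 1) else (fc, bc)
    (intervals, i, fcbc.1, fcbc.2)
  else
    (intervals, interval_start, fc, bc)

-- the loop body of A's step-3 emission loop
def pvEmitA (flip_direction : String) (shouts : List String) (t : Int × Int × String) :
    List String :=
  if t.2.2 = flip_direction ∧ PySem.Int.toStr t.1 ≠ PySem.Int.toStr t.2.1 then
    shouts ++ ["People in positions " ++ PySem.Int.toStr t.1 ++ " through " ++
      PySem.Int.toStr t.2.1 ++ " flip your caps!"]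
  else if t.2.2 = flip_direction then
    shouts ++ ["Person in position " ++ PySem.Int.toStr t.1 ++ " flip your cap!"]
  else
    shouts

def please_flip_bare (caps : List String) : List String :=
  let new_caps := caps ++ ["end"]
  let st := (PySem.List.pyRange 1 (new_caps.length : Int) 1).foldl (pvStepA new_caps)
    ([], 0, 0, 0)
  let flip_direction := if st.2.2.1 < st.2.2.2 then "F" else "B"
  st.1.foldl (pvEmitA flip_direction) []

-- ===== PORT B =====
def pvShout (s e : Int) : String :=
  if s ≠ e then
    "People in positions " ++ PySem.Int.toStr s ++ " through " ++
      PySem.Int.toStr e ++ " flip your caps!"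
  else
    "Person in position " ++ PySem.Int.toStr s ++ " flip your cap!"

-- 'caps[i] == d and (i == 0 or caps[i-1] != d)'
def pvStartPred (caps : List String) (d : String) (i : Int) : Bool :=
  PySem.List.pyGet? caps i == some d &&
    (i == 0 || !(PySem.List.pyGet? caps (i - 1) == some d))

-- 'caps[i] == d and (i == n-1 or caps[i+1] != d)'
def pvEndPred (caps : List String) (d : String) (i : Int) : Bool :=
  PySem.List.pyGet? caps i == some d &&
    (i == (caps.length : Int) - 1 || !(PySem.List.pyGet? caps (i + 1) == some d))

def pvStartsB (caps : List String) (d : String) : List Int :=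
  (PySem.List.pyRange 0 (caps.length : Int) 1).filter (pvStartPred caps d)

def pvEndsB (caps : List String) (d : String) : List Int :=
  (PySem.List.pyRange 0 (caps.length : Int) 1).filter (pvEndPred caps d)

def pvShoutsFor (caps : List String) (d : String) : List String :=
  ((pvStartsB caps d).zip (pvEndsB caps d)).map (fun p => pvShout p.1 p.2)

def please_flip_bare_alt (caps : List String) : List String :=
  let forward := pvShoutsFor caps "F"
  let backward := pvShoutsFor caps "B"
  if forward.length < backward.length then forward else backward

-- ===== PRECONDITION & SPEC =====
def Spec_please_flip_bare (caps : List String) (out : List String) : Prop := out = please_flip_bare_alt caps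
instance (caps : List String) (out : List String) : Decidable (Spec_please_flip_bare caps out) := by unfold Spec_please_flip_bare; infer_instance

-- ===== CLAIM (what is proved, stated in full; the proofs are below) =====
def Claim_equal_please_flip_bare : Prop := ∀ (caps : List String), Dom_please_flip_bare caps → Spec_please_flip_bare caps (please_flip_bare caps)

-- ===== LEMMAS AND PROOFS =====

-- str(n) is injective
lemma pv_digitChar_inj {m n : Nat} (hm : m < 10) (hn : n < 10)
    (h : Nat.digitChar m = Nat.digitChar n) : m = n := by
  interval_cases m <;> interval_cases n <;> simp_all [Nat.digitChar]
lemma pv_toDigits_inj : ∀ m n : Nat, Nat.toDigits 10 m = Nat.toDigits 10 n → m = n := by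
  intro m
  induction m using Nat.strong_induction_on with
  | _ m ih =>
    intro n h
    rw [Nat.toDigits_eq_if (b := 10) (n := m) (by norm_num),
        Nat.toDigits_eq_if (b := 10) (n := n) (by norm_num)] at h
    by_cases hm : m < 10 <;> by_cases hn : n < 10 <;> simp [hm, hn] at h
    · exact pv_digitChar_inj hm hn h
    · have h1 : 0 < (Nat.toDigits 10 (n / 10)).length := Nat.length_toDigits_pos
      have h2 := congrArg List.length h
      simp only [List.length_append, List.length_cons, List.length_nil] at h2
      omega
    · have h1 : 0 < (Nat.toDigits 10 (m / 10)).length := Nat.length_toDigits_pos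
      have h2 := congrArg List.length h
      simp only [List.length_append, List.length_cons, List.length_nil] at h2
      omega
    · have h3 := ih (m / 10) (by omega) (n / 10) h.1
      have h4 := pv_digitChar_inj (Nat.mod_lt _ (by norm_num)) (Nat.mod_lt _ (by norm_num)) h.2
      omega
lemma pv_toStr_inj {m n : Int} (h : PySem.Int.toStr m = PySem.Int.toStr n) : m = n := by
  have h' : PySem.Int.toChars m = PySem.Int.toChars n := by
    simpa using congrArg String.toList h
  unfold PySem.Int.toChars at h'
  by_cases hm : m < 0 <;> by_cases hn : n < 0 <;> simp [hm, hn] at h'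
  · have := pv_toDigits_inj _ _ h'; omega
  · exfalso
    have hmem : '-' ∈ Nat.toDigits 10 n.toNat := by
      rcases e : Nat.toDigits 10 n.toNat with _ | ⟨c, cs⟩
      · have h1 : 0 < (Nat.toDigits 10 n.toNat).length := Nat.length_toDigits_pos
        simp [e] at h1
      · rw [e] at h'; cases h'; simp
    have h2 := Nat.isDigit_of_mem_toDigits (by norm_num) (by norm_num) hmem
    simp [Char.isDigit] at h2
  · exfalso
    have hmem : '-' ∈ Nat.toDigits 10 m.toNat := by
      rcases e : Nat.toDigits 10 m.toNat with _ | ⟨c, cs⟩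
      · have h1 : 0 < (Nat.toDigits 10 m.toNat).length := Nat.length_toDigits_pos
        simp [e] at h1
      · rw [e] at h'; cases h'; simp
    have h2 := Nat.isDigit_of_mem_toDigits (by norm_num) (by norm_num) hmem
    simp [Char.isDigit] at h2
  · have := pv_toDigits_inj _ _ h'; omega

-- A's emission pass produces exactly the shout list of the flip-direction intervals
lemma pv_emit_step (flip : String) (acc : List String) (t : Int × Int × String) :
    pvEmitA flip acc t = acc ++ (if t.2.2 == flip then [pvShout t.1 t.2.1] else []) := by
  unfold pvEmitA pvShout
  by_cases h1 : t.2.2 = flip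
  · by_cases h2 : PySem.Int.toStr t.1 = PySem.Int.toStr t.2.1
    · have h3 : t.1 = t.2.1 := pv_toStr_inj h2
      simp [h1, h3]
    · have h3 : t.1 ≠ t.2.1 := fun e => h2 (by rw [e])
      simp [h1, h2, h3]
  · simp [h1]

lemma pv_emit_eq (flip : String) : ∀ (ints : List (Int × Int × String)) (acc : List String),
    ints.foldl (pvEmitA flip) acc =
      acc ++ (ints.filter (fun t => t.2.2 == flip)).map (fun t => pvShout t.1 t.2.1) := by
  intro ints
  induction ints with
  | nil => intro acc; simp
  | cons t ints ih =>
    intro acc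
    rw [List.foldl_cons, ih, pv_emit_step]
    by_cases h : t.2.2 == flip <;> simp [h]

-- A's counters count the 'F' / 'B' intervals
lemma pv_counts_step (nc : List String) (ints : List (Int × Int × String)) (s fc bc i : Int)
    (h1 : fc = ((ints.filter (fun t => t.2.2 == "F")).length : Int))
    (h2 : bc = ((ints.filter (fun t => t.2.2 == "B")).length : Int)) :
    (pvStepA nc (ints, s, fc, bc) i).2.2.1 =
      (((pvStepA nc (ints, s, fc, bc) i).1.filter (fun t => t.2.2 == "F")).length : Int) ∧
    (pvStepA nc (ints, s, fc, bc) i).2.2.2 =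
      (((pvStepA nc (ints, s, fc, bc) i).1.filter (fun t => t.2.2 == "B")).length : Int) := by
  unfold pvStepA
  dsimp only
  by_cases hc : PySem.List.pyGet? nc s ≠ PySem.List.pyGet? nc i
  · rw [if_pos hc]
    by_cases hF : (PySem.List.pyGet? nc s).getD "" = "F"
    · simp [List.filter_append, hF, h1, h2]
    · by_cases hB : (PySem.List.pyGet? nc s).getD "" = "B" <;>
        simp [List.filter_append, hF, hB, h1, h2]
  · rw [if_neg hc]
    exact ⟨h1, h2⟩

lemma pv_counts (nc : List String) : ∀ (l : List Int)
    (st : List (Int × Int × String) × Int × Int × Int),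
    st.2.2.1 = ((st.1.filter (fun t => t.2.2 == "F")).length : Int) →
    st.2.2.2 = ((st.1.filter (fun t => t.2.2 == "B")).length : Int) →
    (l.foldl (pvStepA nc) st).2.2.1 =
      (((l.foldl (pvStepA nc) st).1.filter (fun t => t.2.2 == "F")).length : Int) ∧
    (l.foldl (pvStepA nc) st).2.2.2 =
      (((l.foldl (pvStepA nc) st).1.filter (fun t => t.2.2 == "B")).length : Int) := by
  intro l
  induction l with
  | nil => intro st h1 h2; exact ⟨h1, h2⟩
  | cons i l ih =>
    intro st h1 h2
    obtain ⟨ints, s, fc, bc⟩ := st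
    simp only [List.foldl_cons]
    obtain ⟨g1, g2⟩ := pv_counts_step nc ints s fc bc i h1 h2
    exact ih _ g1 g2

-- main parallel lemma: the starts/ends of A's intervals of direction d are exactly the
-- indices picked out by B's boundary predicates
lemma pv_main (caps : List String) (d : String) (hd : d ≠ "end") :
    ∀ (l : List String) (j : Nat) (s fc bc : Int) (prev : String)
      (ints : List (Int × Int × String)),
    caps.drop j = l → 1 ≤ j → j ≤ caps.length →
    PySem.List.pyGet? (caps ++ ["end"]) s = some prev →
    PySem.List.pyGet? caps ((j : Int) - 1) = some prev →
    (let fin := (PySem.List.pyRange (j : Int) ((caps.length : Int) + 1) 1).foldl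
        (pvStepA (caps ++ ["end"])) (ints, s, fc, bc)
     ((fin.1.filter (fun t => t.2.2 == d)).map (fun t => t.1) =
        (ints.filter (fun t => t.2.2 == d)).map (fun t => t.1) ++
        (if prev = d then [s] else []) ++
        (PySem.List.pyRange (j : Int) (caps.length : Int) 1).filter (pvStartPred caps d)) ∧
     ((fin.1.filter (fun t => t.2.2 == d)).map (fun t => t.2.1) =
        (ints.filter (fun t => t.2.2 == d)).map (fun t => t.2.1) ++
        (if prev = d ∧ l.head? ≠ some d then [(j : Int) - 1] else []) ++
        (PySem.List.pyRange (j : Int) (caps.length : Int) 1).filter (pvEndPred caps d))) := by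
  intro l
  induction l with
  | nil =>
    intro j s fc bc prev ints hdrop h1j hle hs hprev
    have hj : j = caps.length := by
      have := List.drop_eq_nil_iff.mp hdrop
      omega
    subst hj
    have hend : PySem.List.pyGet? (caps ++ ["end"]) ((caps.length : Nat) : Int) = some "end" :=
      PySem.List.pyGet?_append_length caps [] "end"
    rw [PySem.List.pyRange_one_cons (by omega), PySem.List.pyRange_one_eq_nil (a := (caps.length : Int) + 1) (by omega),
        PySem.List.pyRange_one_eq_nil (a := (caps.length : Int)) (by omega)]
    simp only [List.foldl_cons, List.foldl_nil, List.filter_nil]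
    unfold pvStepA
    dsimp only
    rw [hs, hend]
    by_cases hpe : prev = "end"
    · rw [if_neg (by simp [hpe])]
      have hpd : ¬ prev = d := by rw [hpe]; exact fun e => hd e.symm
      simp [hpd]
    · rw [if_pos (by simp [hpe])]
      simp only [Option.getD_some]
      by_cases hpd : prev = d <;>
        simp [List.filter_append, hpd]
  | cons c l' ih =>
    intro j s fc bc prev ints hdrop h1j hle hs hprev
    have hjlt : j < caps.length := by
      have := congrArg List.length hdrop
      simp at this
      omega
    have hcj : PySem.List.pyGet? caps ((j : Nat) : Int) = some c := by
      rw [PySem.List.pyGet?_natCast]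
      have h0 : (caps.drop j)[0]? = some c := by rw [hdrop]; rfl
      rw [List.getElem?_drop] at h0
      simpa using h0
    have hcjnc : PySem.List.pyGet? (caps ++ ["end"]) ((j : Nat) : Int) = some c := by
      rw [PySem.List.pyGet?_natCast]
      rw [List.getElem?_append_left (by omega)]
      rw [PySem.List.pyGet?_natCast] at hcj
      exact hcj
    have hdrop' : caps.drop (j + 1) = l' := by
      have h0 : caps.drop (j + 1) = (caps.drop j).drop 1 := by rw [List.drop_drop]
      rw [h0, hdrop]; rfl
    have hcast : ((j : Int) + 1) = (((j + 1 : Nat) : Nat) : Int) := by push_cast; ring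
    have hjj : (((j + 1 : Nat) : Nat) : Int) - 1 = ((j : Nat) : Int) := by push_cast; ring
    -- the two boundary predicates at index j
    have hstart : pvStartPred caps d (j : Int) = (decide (c = d) && !(decide (prev = d))) := by
      unfold pvStartPred
      rw [hcj, hprev]
      have hj0 : ((j : Int) == 0) = false := by rw [beq_eq_false_iff_ne]; omega
      rw [hj0]
      simp [beq_eq_decide]
    have hendp : pvEndPred caps d (j : Int) =
        (decide (c = d) && !(decide (l'.head? = some d))) := by
      unfold pvEndPred
      rw [hcj]
      cases l' with
      | nil =>
        have hj1 : j + 1 = caps.length := by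
          have := congrArg List.length hdrop'
          simp at this
          omega
        have he : ((j : Int) == (caps.length : Int) - 1) = true := by rw [beq_iff_eq]; omega
        rw [he]
        simp [beq_eq_decide]
      | cons c' l'' =>
        have hj1 : j + 1 < caps.length := by
          have := congrArg List.length hdrop'
          simp at this
          omega
        have hc' : PySem.List.pyGet? caps ((j : Int) + 1) = some c' := by
          rw [hcast, PySem.List.pyGet?_natCast]
          have h0 : (caps.drop (j + 1))[0]? = some c' := by rw [hdrop']; rfl
          rw [List.getElem?_drop] at h0
          simpa using h0
        have he : ((j : Int) == (caps.length : Int) - 1) = false := by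
          rw [beq_eq_false_iff_ne]; omega
        rw [he, hc']
        simp [beq_eq_decide]
    rw [PySem.List.pyRange_one_cons (a := (j : Int)) (b := (caps.length : Int) + 1) (by omega),
        PySem.List.pyRange_one_cons (a := (j : Int)) (b := (caps.length : Int)) (by omega)]
    simp only [List.foldl_cons, List.filter_cons]
    by_cases hcp : c = prev
    · -- run continues: A's step is a no-op, j is neither a start nor an end boundary
      have ha : pvStepA (caps ++ ["end"]) (ints, s, fc, bc) (j : Int) = (ints, s, fc, bc) := by
        unfold pvStepA
        dsimp only
        rw [hs, hcjnc, hcp]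
        simp
      rw [ha, hcast]
      have hprev' : PySem.List.pyGet? caps ((((j + 1 : Nat) : Nat) : Int) - 1) = some prev := by
        rw [hjj, hcj, hcp]
      obtain ⟨ihS, ihE⟩ := ih (j + 1) s fc bc prev ints hdrop' (by omega) (by omega) hs hprev'
      rw [hjj] at ihE
      constructor
      · rw [ihS, hstart]
        have hf : (decide (c = d) && !(decide (prev = d))) = false := by
          by_cases hpd : prev = d <;> simp [hcp, hpd]
        rw [hf]
        simp
      · rw [ihE, hendp]
        by_cases hpd : prev = d <;> by_cases hl : l'.head? = some d <;>
          simp [hcp, hpd, hl, List.append_assoc]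
    · -- run closes at j - 1: A appends the interval (s, j-1, prev) and restarts at j
      have hsc : PySem.List.pyGet? (caps ++ ["end"]) s ≠
          PySem.List.pyGet? (caps ++ ["end"]) ((j : Nat) : Int) := by
        rw [hs, hcjnc]
        simp only [ne_eq, Option.some.injEq]
        exact fun e => hcp e.symm
      have ha : pvStepA (caps ++ ["end"]) (ints, s, fc, bc) (j : Int) =
          (ints ++ [(s, (j : Int) - 1, prev)], (j : Int),
            (if prev = "F" then (fc + 1, bc) else if prev = "B" then (fc, bc + 1) else (fc, bc)).1,
            (if prev = "F" then (fc + 1, bc) else if prev = "B" then (fc, bc + 1) else (fc, bc)).2) := by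
        unfold pvStepA
        dsimp only
        rw [if_pos hsc, hs]
        simp only [Option.getD_some]
        rfl
      rw [ha, hcast]
      have hprev' : PySem.List.pyGet? caps ((((j + 1 : Nat) : Nat) : Int) - 1) = some c := by
        rw [hjj]; exact hcj
      obtain ⟨ihS, ihE⟩ := ih (j + 1) ((j : Nat) : Int)
        (if prev = "F" then (fc + 1, bc) else if prev = "B" then (fc, bc + 1) else (fc, bc)).1
        (if prev = "F" then (fc + 1, bc) else if prev = "B" then (fc, bc + 1) else (fc, bc)).2
        c (ints ++ [(s, (j : Int) - 1, prev)]) hdrop' (by omega) (by omega) hcjnc hprev'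
      rw [hjj] at ihE
      constructor
      · rw [ihS, hstart]
        by_cases hcd : c = d <;> by_cases hpd : prev = d
        · exact absurd (hcd.trans hpd.symm) hcp
        · simp [List.filter_append, hcd, hpd, List.append_assoc]
        · simp [List.filter_append, hcd, hpd, List.append_assoc]
        · simp [List.filter_append, hcd, hpd, List.append_assoc]
      · rw [ihE, hendp]
        by_cases hcd : c = d <;> by_cases hpd : prev = d
        · exact absurd (hcd.trans hpd.symm) hcp
        · by_cases hl : l'.head? = some d <;>
            simp [List.filter_append, hcd, hpd, hl, List.append_assoc]
        · by_cases hl : l'.head? = some d <;>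
            simp [List.filter_append, hcd, hpd, hl, List.append_assoc]
        · by_cases hl : l'.head? = some d <;>
            simp [List.filter_append, hcd, hpd, hl, List.append_assoc]

-- for a non-empty caps list, B's starts/ends lists are exactly the starts/ends of A's
-- d-intervals, hence B's shouts for d are A's emission for flip direction d
lemma pv_sides (c0 : String) (rest : List String) (d : String) (hd : d ≠ "end") :
    (let fin := (PySem.List.pyRange 1 ((((c0 :: rest) ++ ["end"]).length : Nat) : Int) 1).foldl
        (pvStepA ((c0 :: rest) ++ ["end"])) ([], 0, 0, 0)
     pvShoutsFor (c0 :: rest) d =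
       (fin.1.filter (fun t => t.2.2 == d)).map (fun t => pvShout t.1 t.2.1)) := by
  have hs0 : PySem.List.pyGet? ((c0 :: rest) ++ ["end"]) 0 = some c0 := by
    rw [List.cons_append]
    exact PySem.List.pyGet?_zero_cons c0 (rest ++ ["end"])
  have hprev0 : PySem.List.pyGet? (c0 :: rest) (((1 : Nat) : Int) - 1) = some c0 := by
    rw [show (((1 : Nat) : Int) - 1) = (0 : Int) by norm_num]
    exact PySem.List.pyGet?_zero_cons c0 rest
  have hmain := pv_main (c0 :: rest) d hd rest 1 0 0 0 c0 [] rfl (by omega) (by simp) hs0 hprev0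
  dsimp only at hmain ⊢
  have hlen : ((((c0 :: rest) ++ ["end"]).length : Nat) : Int) =
      (((c0 :: rest).length : Nat) : Int) + 1 := by simp
  rw [hlen]
  have hone : (((1 : Nat) : Nat) : Int) = (1 : Int) := by norm_num
  rw [hone] at hmain
  obtain ⟨hS, hE⟩ := hmain
  simp only [List.filter_nil, List.map_nil, List.nil_append] at hS hE
  set fin := (PySem.List.pyRange 1 ((((c0 :: rest).length : Nat) : Int) + 1) 1).foldl
    (pvStepA ((c0 :: rest) ++ ["end"])) (([] : List (Int × Int × String)), (0 : Int), (0 : Int), (0 : Int)) with hfin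
  -- B's starts list equals the starts of A's d-intervals
  have hn0 : (0 : Int) < (((c0 :: rest).length : Nat) : Int) := by
    simp only [List.length_cons]
    push_cast
    omega
  have hstartsB : pvStartsB (c0 :: rest) d =
      (fin.1.filter (fun t => t.2.2 == d)).map (fun t => t.1) := by
    unfold pvStartsB
    rw [PySem.List.pyRange_one_cons hn0]
    rw [List.filter_cons]
    have hp0 : pvStartPred (c0 :: rest) d 0 = decide (c0 = d) := by
      unfold pvStartPred
      rw [show PySem.List.pyGet? (c0 :: rest) 0 = some c0 from
        PySem.List.pyGet?_zero_cons c0 rest]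
      simp [beq_eq_decide]
    rw [hp0, hS]
    by_cases hcd : c0 = d <;> simp [hcd]
  have hendsB : pvEndsB (c0 :: rest) d =
      (fin.1.filter (fun t => t.2.2 == d)).map (fun t => t.2.1) := by
    unfold pvEndsB
    rw [PySem.List.pyRange_one_cons hn0]
    rw [List.filter_cons]
    have hp0 : pvEndPred (c0 :: rest) d 0 =
        (decide (c0 = d) && !(decide (rest.head? = some d))) := by
      unfold pvEndPred
      rw [show PySem.List.pyGet? (c0 :: rest) 0 = some c0 from
        PySem.List.pyGet?_zero_cons c0 rest]
      cases rest with
      | nil =>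
        have : ((0 : Int) == ((c0 :: ([] : List String)).length : Int) - 1) = true := by
          simp
        rw [this]
        simp [beq_eq_decide]
      | cons c1 rest' =>
        have h1 : PySem.List.pyGet? (c0 :: c1 :: rest') ((0 : Int) + 1) = some c1 := by
          rw [show ((0 : Int) + 1) = (((1 : Nat) : Nat) : Int) by norm_num]
          rw [PySem.List.pyGet?_natCast]
          rfl
        have h2 : ((0 : Int) == ((c0 :: c1 :: rest').length : Int) - 1) = false := by
          rw [beq_eq_false_iff_ne]
          simp only [List.length_cons]
          push_cast
          omega
        rw [h1, h2]
        simp [beq_eq_decide]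
    rw [hp0, hE]
    have hcond : (if c0 = d ∧ rest.head? ≠ some d then [((1 : Int)) - 1] else []) =
        (if (decide (c0 = d) && !(decide (rest.head? = some d))) = true then [(0 : Int)] else []) := by
      by_cases hcd : c0 = d <;> by_cases hl : rest.head? = some d <;> simp [hcd, hl]
    rw [hcond]
    by_cases hcd : c0 = d <;> by_cases hl : rest.head? = some d <;> simp [hcd, hl]
  unfold pvShoutsFor
  rw [hstartsB, hendsB, List.zip_map']
  rw [List.map_map]
  rfl

-- ===== VERDICT (by name: the statement is the Claim_ definition above) =====
theorem please_flip_bare_spec : Claim_equal_please_flip_bare := by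
  intro caps _
  unfold Spec_please_flip_bare
  cases caps with
  | nil => decide
  | cons c0 rest =>
    unfold please_flip_bare please_flip_bare_alt
    dsimp only
    have hF := pv_sides c0 rest "F" (by decide)
    have hB := pv_sides c0 rest "B" (by decide)
    dsimp only at hF hB
    set fin := (PySem.List.pyRange 1 ((((c0 :: rest) ++ ["end"]).length : Nat) : Int) 1).foldl
      (pvStepA ((c0 :: rest) ++ ["end"])) (([] : List (Int × Int × String)), (0 : Int), (0 : Int), (0 : Int)) with hfin
    have hcounts := pv_counts ((c0 :: rest) ++ ["end"])
      (PySem.List.pyRange 1 ((((c0 :: rest) ++ ["end"]).length : Nat) : Int) 1)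
      ([], 0, 0, 0) (by simp) (by simp)
    rw [← hfin] at hcounts
    obtain ⟨hcF, hcB⟩ := hcounts
    have hlenF : (pvShoutsFor (c0 :: rest) "F").length =
        (fin.1.filter (fun t => t.2.2 == "F")).length := by rw [hF]; simp
    have hlenB : (pvShoutsFor (c0 :: rest) "B").length =
        (fin.1.filter (fun t => t.2.2 == "B")).length := by rw [hB]; simp
    by_cases hflip : fin.2.2.1 < fin.2.2.2
    · rw [if_pos hflip]
      have hlt : (pvShoutsFor (c0 :: rest) "F").length < (pvShoutsFor (c0 :: rest) "B").length := by
        rw [hcF, hcB] at hflip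
        rw [hlenF, hlenB]
        exact_mod_cast hflip
      rw [if_pos hlt, pv_emit_eq, hF]
      simp
    · rw [if_neg hflip]
      have hlt : ¬ (pvShoutsFor (c0 :: rest) "F").length < (pvShoutsFor (c0 :: rest) "B").length := by
        rw [hcF, hcB] at hflip
        rw [hlenF, hlenB]
        intro h
        exact hflip (by exact_mod_cast h)
      rw [if_neg hlt, pv_emit_eq, hB]
      simp
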